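-- pv_equiv track=rewrite | github.com/mb-89/dfana | src/dfana/pltfuns.py | groupByTargetAxis
-- ===== SOURCE A (Python) =====
-- def groupByTargetAxis(dssel):
--     axes = []
--     for axidx in range(10):
--         tmp = []
--         for dfidx,axsel in dssel.items():
--             if axidx in axsel:
--                 tmp.append(dfidx)
--         axes.append(tmp)
--     return axes
-- ===== SOURCE B (Python) =====
-- def groupByTargetAxis(dssel):
--     axes = [[] for _ in range(10)]
--     for dfidx, axsel in dssel.items():
--         for ax in dict.fromkeys(axsel):
--             if 0 <= ax < 10:
--                 axes[ax].append(dfidx)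
--     return axes
-- ===== Notes on version B (the rewrite author's own statement) =====
-- stated objective: alternative
-- what changed: Inverts A's 10-axis-by-items nested scan into a single scatter pass over the items, appending each dfidx directly to its (deduplicated, range-guarded) target axes; it trades repeated membership tests for one dedup pass per item at similar overall cost.
import Mathlib
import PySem

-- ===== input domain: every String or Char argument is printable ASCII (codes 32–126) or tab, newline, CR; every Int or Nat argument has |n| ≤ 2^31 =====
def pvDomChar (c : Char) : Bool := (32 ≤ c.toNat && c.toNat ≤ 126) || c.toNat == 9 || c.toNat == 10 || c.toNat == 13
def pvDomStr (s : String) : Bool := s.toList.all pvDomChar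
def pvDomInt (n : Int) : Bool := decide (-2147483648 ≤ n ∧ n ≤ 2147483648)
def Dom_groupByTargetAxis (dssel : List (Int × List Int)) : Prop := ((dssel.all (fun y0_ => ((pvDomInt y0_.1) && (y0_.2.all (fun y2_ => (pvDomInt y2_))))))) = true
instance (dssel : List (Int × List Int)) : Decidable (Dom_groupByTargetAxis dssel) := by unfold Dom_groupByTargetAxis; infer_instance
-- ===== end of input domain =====

-- B replaces A's 10 passes over the items (one per axis) by a single scatter pass over
-- the items that appends each dfidx to its (deduplicated, range-guarded) target axes.

-- ===== PORT A =====
def groupByTargetAxis (dssel : List (Int × List Int)) : List (List Int) :=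
  (PySem.List.pyRange 0 10 1).foldl (fun axes axidx =>
    axes ++ [dssel.foldl (fun tmp p => if axidx ∈ p.2 then tmp ++ [p.1] else tmp) []]) []

-- ===== PORT B =====
def groupByTargetAxis_alt (dssel : List (Int × List Int)) : List (List Int) :=
  dssel.foldl (fun axes p =>
    (PySem.Set.ofList p.2).foldl (fun axes ax =>
      if 0 ≤ ax ∧ ax < 10 then axes.set ax.toNat (axes.getD ax.toNat [] ++ [p.1]) else axes) axes)
    (List.replicate 10 [])

-- ===== PRECONDITION & SPEC =====
def Spec_groupByTargetAxis (dssel : List (Int × List Int)) (out : List (List Int)) : Prop := out = groupByTargetAxis_alt dssel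
instance (dssel : List (Int × List Int)) (out : List (List Int)) : Decidable (Spec_groupByTargetAxis dssel out) := by unfold Spec_groupByTargetAxis; infer_instance

-- ===== CLAIM (what is proved, stated in full; the proofs are below) =====
def Claim_equal_groupByTargetAxis : Prop := ∀ (dssel : List (Int × List Int)), Dom_groupByTargetAxis dssel → Spec_groupByTargetAxis dssel (groupByTargetAxis dssel)

-- ===== LEMMAS AND PROOFS =====

-- the items selected for axis i, in items order (what A computes for axis i)
def groupAt (i : Int) (dssel : List (Int × List Int)) : List Int :=
  (dssel.filter (fun p => decide (i ∈ p.2))).map (·.1)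

-- one item's scatter step of B
def scatterItem (p : Int × List Int) (axes : List (List Int)) : List (List Int) :=
  (PySem.Set.ofList p.2).foldl (fun axes ax =>
    if 0 ≤ ax ∧ ax < 10 then axes.set ax.toNat (axes.getD ax.toNat [] ++ [p.1]) else axes) axes

theorem length_innerFold (d : Int) (L : List Int) (axes : List (List Int)) :
    (L.foldl (fun axes ax =>
      if 0 ≤ ax ∧ ax < 10 then axes.set ax.toNat (axes.getD ax.toNat [] ++ [d]) else axes) axes).length
      = axes.length := by
  induction L generalizing axes with
  | nil => rfl
  | cons a t ih => simp only [List.foldl_cons]; rw [ih]; split_ifs <;> simp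

theorem getD_innerFold (d : Int) (L : List Int) (hL : L.Nodup) (axes : List (List Int))
    (i : Nat) (hi : i < axes.length) (hi10 : i < 10) :
    (L.foldl (fun axes ax =>
      if 0 ≤ ax ∧ ax < 10 then axes.set ax.toNat (axes.getD ax.toNat [] ++ [d]) else axes) axes).getD i []
      = axes.getD i [] ++ (if (i : Int) ∈ L then [d] else []) := by
  induction L generalizing axes with
  | nil => simp
  | cons a t ih =>
    rcases List.nodup_cons.mp hL with ⟨ha, ht⟩
    simp only [List.foldl_cons]
    by_cases hai : a = (i : Int)
    · subst hai
      rw [if_pos ⟨Int.natCast_nonneg i, by exact_mod_cast hi10⟩]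
      rw [ih ht _ (by simpa using hi)]
      rw [Int.toNat_natCast i]
      have hnot : ((i : Int) ∉ t) := ha
      rw [if_neg hnot, if_pos (List.mem_cons_self)]
      simp [List.getD, hi]
    · have hmem : (((i : Int) ∈ a :: t) ↔ ((i : Int) ∈ t)) := by
        simp only [List.mem_cons]
        constructor
        · rintro (h | h)
          · exact absurd h.symm hai
          · exact h
        · exact Or.inr
      by_cases hg : (0 : Int) ≤ a ∧ a < 10
      · rw [if_pos hg, ih ht _ (by simp [hi])]; simp only [hmem]
        have hne : a.toNat ≠ i := by intro h; apply hai; omega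
        congr 1
        simp [List.getD, List.getElem?_set_ne hne]
      · rw [if_neg hg, ih ht _ hi]; simp only [hmem]

theorem length_scatterItem (p : Int × List Int) (axes : List (List Int)) :
    (scatterItem p axes).length = axes.length := length_innerFold p.1 _ axes

theorem getD_scatterItem (p : Int × List Int) (axes : List (List Int)) (i : Nat)
    (hi : i < axes.length) (hi10 : i < 10) :
    (scatterItem p axes).getD i [] = axes.getD i [] ++ (if (i : Int) ∈ p.2 then [p.1] else []) := by
  rw [scatterItem, getD_innerFold p.1 _ (PySem.Set.nodup_ofList p.2) axes i hi hi10]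
  simp [PySem.Set.mem_ofList]

theorem length_scatterFold (dssel : List (Int × List Int)) (axes : List (List Int)) :
    (dssel.foldl (fun axes p => scatterItem p axes) axes).length = axes.length := by
  induction dssel generalizing axes with
  | nil => rfl
  | cons p t ih => simp only [List.foldl_cons]; rw [ih, length_scatterItem]

theorem getD_scatterFold (dssel : List (Int × List Int)) (axes : List (List Int)) (i : Nat)
    (hi : i < axes.length) (hi10 : i < 10) :
    (dssel.foldl (fun axes p => scatterItem p axes) axes).getD i []
      = axes.getD i [] ++ groupAt (i : Int) dssel := by
  induction dssel generalizing axes with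
  | nil => simp [groupAt]
  | cons p t ih =>
    simp only [List.foldl_cons]
    rw [ih _ (by rw [length_scatterItem]; exact hi), getD_scatterItem p axes i hi hi10]
    by_cases h : (i : Int) ∈ p.2 <;> simp [groupAt, h]

theorem alt_eq_map (dssel : List (Int × List Int)) :
    groupByTargetAxis_alt dssel = (List.range 10).map (fun i : Nat => groupAt (i : Int) dssel) := by
  have hfold : groupByTargetAxis_alt dssel
      = dssel.foldl (fun axes p => scatterItem p axes) (List.replicate 10 []) := rfl
  rw [hfold]
  apply List.ext_getElem
  · rw [length_scatterFold]; simp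
  · intro n h1 h2
    have hn : n < 10 := by simpa using h2
    have hlen : n < (List.replicate 10 ([] : List Int)).length := by simpa
    have := getD_scatterFold dssel (List.replicate 10 []) n hlen hn
    rw [List.getD_eq_getElem _ _ h1] at this
    rw [this, List.getD_eq_getElem _ _ hlen, List.getElem_replicate]
    simp

theorem foldl_groupAt (i : Int) (dssel : List (Int × List Int)) (init : List Int) :
    dssel.foldl (fun tmp p => if i ∈ p.2 then tmp ++ [p.1] else tmp) init = init ++ groupAt i dssel := by
  induction dssel generalizing init with
  | nil => simp [groupAt]
  | cons p t ih =>
    simp only [List.foldl_cons]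
    rw [ih]
    by_cases h : i ∈ p.2 <;> simp [groupAt, h]

theorem a_eq_map (dssel : List (Int × List Int)) :
    groupByTargetAxis dssel = (List.range 10).map (fun i : Nat => groupAt (i : Int) dssel) := by
  rw [groupByTargetAxis]
  rw [PySem.List.foldl_append_singleton_eq_map]
  have hR : PySem.List.pyRange 0 10 1 = (List.range 10).map (fun k : Nat => (k : Int)) := by decide
  rw [hR, List.map_map]
  simp only [List.nil_append]
  apply List.map_congr_left
  intro k hk
  simp only [Function.comp]
  rw [foldl_groupAt]
  simp

-- ===== VERDICT (by name: the statement is the Claim_ definition above) =====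
theorem groupByTargetAxis_spec : Claim_equal_groupByTargetAxis := by
  intro dssel _
  unfold Spec_groupByTargetAxis
  rw [a_eq_map, alt_eq_map]
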